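-- pv_equiv track=rewrite | github.com/decohutz/dossie-engine | src/parsers/xlsx_financial_parser.py | _first_contiguous_run
-- ===== SOURCE A (Python) =====
-- def _first_contiguous_run(year_cols: list[tuple[int, str]]) -> list[tuple[int, str]]:
--     """Keep only the first contiguous run of year columns.
--
--     Regenera DRE sheets duplicate the years for an "Análise Vertical"
--     block to the right, separated by a "Ref" column. The two blocks have
--     a column gap, so we cut at the first gap > 1.
--     """
--     if not year_cols:
--         return []
--     run = [year_cols[0]]
--     for prev, curr in zip(year_cols, year_cols[1:]):
--         if curr[0] - prev[0] == 1:
--             run.append(curr)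
--         else:
--             break
--     return run
-- ===== SOURCE B (Python) =====
-- def _first_contiguous_run(year_cols: list[tuple[int, str]]) -> list[tuple[int, str]]:
--     """Find the cut index (first gap != 1), then slice, instead of
--     appending to an accumulator run."""
--     cut = len(year_cols)
--     for i, (prev, curr) in enumerate(zip(year_cols, year_cols[1:])):
--         if curr[0] - prev[0] != 1:
--             cut = i + 1
--             break
--     return year_cols[:cut]
-- ===== Notes on version B (the rewrite author's own statement) =====
-- stated objective: simpler
-- what changed: B computes the boundary index of the first gap and slices the list once, instead of building the run incrementally by appending; the empty case falls out of the slice instead of an explicit early return.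
import Mathlib
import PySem

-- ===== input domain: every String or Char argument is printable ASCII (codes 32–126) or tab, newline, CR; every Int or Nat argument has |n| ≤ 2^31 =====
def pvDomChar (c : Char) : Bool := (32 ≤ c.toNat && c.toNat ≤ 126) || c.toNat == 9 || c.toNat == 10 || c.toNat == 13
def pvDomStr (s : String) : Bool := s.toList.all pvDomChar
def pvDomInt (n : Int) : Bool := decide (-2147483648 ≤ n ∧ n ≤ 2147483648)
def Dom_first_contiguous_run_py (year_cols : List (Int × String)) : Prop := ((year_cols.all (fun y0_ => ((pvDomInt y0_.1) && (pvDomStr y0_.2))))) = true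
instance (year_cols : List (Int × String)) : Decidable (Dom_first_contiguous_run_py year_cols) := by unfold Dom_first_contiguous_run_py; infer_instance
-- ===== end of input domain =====

-- B finds the cut index of the first gap and slices once, instead of appending to an accumulator run (objective: simpler).

-- ===== PORT A =====
-- A's loop over zip(year_cols, year_cols[1:]) with an accumulator `run` and `break`.
def pvALoop (run : List (Int × String)) : List ((Int × String) × (Int × String)) → List (Int × String)
  | [] => run
  | (prev, curr) :: rest =>
      if curr.1 - prev.1 = 1 then pvALoop (run ++ [curr]) rest else run

def first_contiguous_run_py (year_cols : List (Int × String)) : List (Int × String) :=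
  match year_cols with
  | [] => []
  | h :: _ => pvALoop [h] (year_cols.zip year_cols.tail)

-- ===== PORT B =====
-- B's loop: enumerate(zip(year_cols, year_cols[1:])), break with cut = i+1 at the first gap, default cut = len.
def pvBLoop (len : Nat) (i : Nat) : List ((Int × String) × (Int × String)) → Nat
  | [] => len
  | (prev, curr) :: rest =>
      if curr.1 - prev.1 ≠ 1 then i + 1 else pvBLoop len (i + 1) rest

def first_contiguous_run_py_alt (year_cols : List (Int × String)) : List (Int × String) :=
  year_cols.take (pvBLoop year_cols.length 0 (year_cols.zip year_cols.tail))

-- ===== PRECONDITION & SPEC =====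
def Spec_first_contiguous_run_py (year_cols : List (Int × String)) (out : List (Int × String)) : Prop := out = first_contiguous_run_py_alt year_cols
instance (year_cols : List (Int × String)) (out : List (Int × String)) : Decidable (Spec_first_contiguous_run_py year_cols out) := by unfold Spec_first_contiguous_run_py; infer_instance

-- ===== CLAIM (what is proved, stated in full; the proofs are below) =====
def Claim_equal_first_contiguous_run_py : Prop := ∀ (year_cols : List (Int × String)), Dom_first_contiguous_run_py year_cols → Spec_first_contiguous_run_py year_cols (first_contiguous_run_py year_cols)

-- ===== LEMMAS AND PROOFS =====

-- Reference recursion: the first contiguous run starting at h.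
def pvRun (h : Int × String) : List (Int × String) → List (Int × String)
  | [] => [h]
  | c :: r => if c.1 - h.1 = 1 then h :: pvRun c r else [h]

theorem pvALoop_eq (t : List (Int × String)) : ∀ h run,
    pvALoop run (List.zip (h :: t) t) = run ++ (pvRun h t).tail := by
  induction t with
  | nil => intro h run; simp [pvALoop, pvRun]
  | cons c r ih =>
    intro h run
    simp only [List.zip_cons_cons, pvALoop, pvRun]
    by_cases hc : c.1 - h.1 = 1
    · simp [hc, ih c (run ++ [c]), pvRun]
      cases r <;> simp [pvRun] <;> split <;> simp
    · simp [hc]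

theorem pvBLoop_eq (t : List (Int × String)) : ∀ h i len,
    pvBLoop len i (List.zip (h :: t) t) =
      if pvRun h t = h :: t then len else i + (pvRun h t).length := by
  induction t with
  | nil => intro h i len; simp [pvBLoop, pvRun]
  | cons c r ih =>
    intro h i len
    simp only [List.zip_cons_cons, pvBLoop, pvRun]
    by_cases hc : c.1 - h.1 = 1
    · rw [if_neg (fun hcon => hcon hc), if_pos hc, ih]
      by_cases hr : pvRun c r = c :: r
      · simp [hr]
      · rw [if_neg hr, if_neg (by simp [hr])]
        simp; omega
    · rw [if_pos hc, if_neg hc, if_neg (by simp)]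
      simp

theorem pvRun_prefix (t : List (Int × String)) : ∀ h, pvRun h t <+: h :: t := by
  induction t with
  | nil => intro h; simp [pvRun]
  | cons c r ih =>
    intro h
    simp only [pvRun]
    split
    · exact List.cons_prefix_cons.mpr ⟨rfl, ih c⟩
    · simp

-- ===== VERDICT (by name: the statement is the Claim_ definition above) =====
theorem first_contiguous_run_py_spec : Claim_equal_first_contiguous_run_py := by
  unfold Claim_equal_first_contiguous_run_py
  intro ycs _
  unfold Spec_first_contiguous_run_py first_contiguous_run_py first_contiguous_run_py_alt
  cases ycs with
  | nil => simp [pvBLoop]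
  | cons h t =>
    simp only [List.tail_cons]
    rw [pvALoop_eq, pvBLoop_eq]
    split
    · next heq => simp [heq]
    · next hne =>
      have hcons : [h] ++ (pvRun h t).tail = pvRun h t := by
        cases t <;> simp [pvRun] <;> split <;> simp
      rw [hcons, Nat.zero_add]
      exact List.prefix_iff_eq_take.mp (pvRun_prefix t h)
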